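-- pv_equiv track=rewrite | github.com/yuebuqun112233/proof | proof_method/Proof_with_newlemma.py | unverified_valid_lemmas_for_formal
-- ===== SOURCE A (Python) =====
-- def unverified_valid_lemmas_for_formal(formal, unverified_lemmas):
--     unverified_valid_lemmas = {}
--     unverified_lemmas_ = {}
--     for lemma_name, lemma in unverified_lemmas.items():
--         if lemma_name + " " in formal or lemma_name + ")" in formal or  lemma_name + "(" in formal:
--             unverified_valid_lemmas[lemma_name] = lemma
--         else:
--             unverified_lemmas_[lemma_name] = lemma
--     unverified_lemmas = unverified_lemmas_
--     return unverified_valid_lemmas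
-- ===== SOURCE B (Python) =====
-- def unverified_valid_lemmas_for_formal(formal, unverified_lemmas):
--     # Single scan of formal: at each delimiter position, check for each distinct
--     # name length whether the slice ending there is a lemma name (set lookups),
--     # then keep the lemmas whose name was matched.
--     names = set(unverified_lemmas)
--     lengths = {len(name) for name in unverified_lemmas}
--     matched = set()
--     for p in range(len(formal)):
--         if formal[p] in ' ()':
--             for L in lengths:
--                 if L <= p:
--                     w = formal[p - L:p]
--                     if w in names:
--                         matched.add(w)
--     return {name: lemma for name, lemma in unverified_lemmas.items() if name in matched}
-- ===== Notes on version B (the rewrite author's own statement) =====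
-- stated objective: faster
-- what changed: Instead of running three substring searches over formal for every lemma, B scans formal once and at each delimiter position (' ', '(', ')') looks the preceding slice up in a hash set of lemma names, one probe per distinct name length, then keeps the lemmas whose name was matched.
import Mathlib
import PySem

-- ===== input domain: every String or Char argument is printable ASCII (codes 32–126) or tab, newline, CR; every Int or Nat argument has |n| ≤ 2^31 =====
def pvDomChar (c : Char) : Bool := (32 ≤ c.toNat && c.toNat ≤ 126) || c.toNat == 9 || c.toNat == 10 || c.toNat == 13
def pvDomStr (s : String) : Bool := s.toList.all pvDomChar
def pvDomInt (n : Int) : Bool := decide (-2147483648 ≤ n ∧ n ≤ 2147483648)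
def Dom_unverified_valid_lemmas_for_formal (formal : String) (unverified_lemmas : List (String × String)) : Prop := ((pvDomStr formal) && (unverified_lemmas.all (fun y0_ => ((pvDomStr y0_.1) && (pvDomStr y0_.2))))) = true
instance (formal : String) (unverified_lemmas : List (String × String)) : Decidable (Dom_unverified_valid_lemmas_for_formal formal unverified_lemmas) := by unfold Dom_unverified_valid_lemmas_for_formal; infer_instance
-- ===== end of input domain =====

-- B replaces A's three substring searches per lemma by one scan of `formal`
-- that, at each delimiter position, looks the preceding slice up in a set of
-- names keyed by the distinct name lengths (objective: faster for many lemmas).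


-- ===== PORT A =====
def unverified_valid_lemmas_for_formal (formal : String) (unverified_lemmas : List (String × String)) : List (String × String) :=
  (unverified_lemmas.foldl
    (fun (st : PySem.Dict String String × PySem.Dict String String) kv =>
      if PySem.Chars.isIn (kv.1.toList ++ [' ']) formal.toList
         || PySem.Chars.isIn (kv.1.toList ++ [')']) formal.toList
         || PySem.Chars.isIn (kv.1.toList ++ ['(']) formal.toList
      then (st.1.insert kv.1 kv.2, st.2)
      else (st.1, st.2.insert kv.1 kv.2))
    (PySem.Dict.empty, PySem.Dict.empty)).1.items

-- ===== PORT B =====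
-- `ch in ' ()'` for a single character
def pvIsDelim (c : Char) : Bool := c == ' ' || c == '(' || c == ')'

def unverified_valid_lemmas_for_formal_alt (formal : String) (unverified_lemmas : List (String × String)) : List (String × String) :=
  let fl := formal.toList
  let names : PySem.Set (List Char) := PySem.Set.ofList (unverified_lemmas.map (fun kv => kv.1.toList))
  let lengths : PySem.Set Nat := PySem.Set.ofList (unverified_lemmas.map (fun kv => kv.1.toList.length))
  let matched : PySem.Set (List Char) :=
    (List.range fl.length).foldl
      (fun m p =>
        -- formal[p] is in range (p < len(formal)), so getD is exact here
        if pvIsDelim (fl.getD p ' ') then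
          lengths.foldl
            (fun m2 L =>
              if L ≤ p then
                let w := PySem.List.slice fl (some ((p - L : Nat) : Int)) (some ((p : Nat) : Int))
                if PySem.Set.contains names w then PySem.Set.add m2 w else m2
              else m2)
            m
        else m)
      PySem.Set.empty
  (unverified_lemmas.foldl
    (fun (d : PySem.Dict String String) kv =>
      if PySem.Set.contains matched kv.1.toList then d.insert kv.1 kv.2 else d)
    PySem.Dict.empty).items

-- ===== PRECONDITION & SPEC =====
def Spec_unverified_valid_lemmas_for_formal (formal : String) (unverified_lemmas : List (String × String)) (out : List (String × String)) : Prop := out = unverified_valid_lemmas_for_formal_alt formal unverified_lemmas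
instance (formal : String) (unverified_lemmas : List (String × String)) (out : List (String × String)) : Decidable (Spec_unverified_valid_lemmas_for_formal formal unverified_lemmas out) := by unfold Spec_unverified_valid_lemmas_for_formal; infer_instance

-- ===== CLAIM (what is proved, stated in full; the proofs are below) =====
def Claim_equal_unverified_valid_lemmas_for_formal : Prop := ∀ (formal : String) (unverified_lemmas : List (String × String)), Dom_unverified_valid_lemmas_for_formal formal unverified_lemmas → Spec_unverified_valid_lemmas_for_formal formal unverified_lemmas (unverified_valid_lemmas_for_formal formal unverified_lemmas)

-- ===== LEMMAS AND PROOFS =====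

-- A's per-lemma condition
def pvCondA (fl nm : List Char) : Bool :=
  PySem.Chars.isIn (nm ++ [' ']) fl || PySem.Chars.isIn (nm ++ [')']) fl || PySem.Chars.isIn (nm ++ ['(']) fl

-- B's inner loop body, with the slice rewritten to drop/take
def pvWord (fl : List Char) (p L : Nat) : List Char := (fl.drop (p - L)).take L

-- "nm occurs in fl ending right before a delimiter position p"
def pvMid (fl nm : List Char) : Prop :=
  ∃ p, p < fl.length ∧ pvIsDelim (fl.getD p ' ') = true ∧ nm.length ≤ p ∧ pvWord fl p nm.length = nm

lemma pvSlice_eq_word (fl : List Char) (p L : Nat) (h : L ≤ p) :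
    PySem.List.slice fl (some ((p - L : Nat) : Int)) (some ((p : Nat) : Int)) = pvWord fl p L := by
  rw [PySem.List.slice_natCast, pvWord]
  congr 1
  omega

lemma mem_inner_fold {lcs : List Nat} {fl : List Char} {names m : PySem.Set (List Char)} {p : Nat} {x : List Char} :
    x ∈ lcs.foldl
      (fun m2 L =>
        if L ≤ p then
          let w := PySem.List.slice fl (some ((p - L : Nat) : Int)) (some ((p : Nat) : Int))
          if PySem.Set.contains names w then PySem.Set.add m2 w else m2
        else m2) m
    ↔ x ∈ m ∨ ∃ L ∈ lcs, L ≤ p ∧ pvWord fl p L ∈ names ∧ x = pvWord fl p L := by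
  induction lcs generalizing m with
  | nil => simp
  | cons a t ih =>
    simp only [List.foldl_cons]
    by_cases ha : a ≤ p
    · rw [if_pos ha]
      simp only [pvSlice_eq_word fl p a ha]
      by_cases hc : PySem.Set.contains names (pvWord fl p a) = true
      · rw [if_pos hc]
        rw [ih]
        rw [PySem.Set.contains_iff] at hc
        constructor
        · rintro (h | h)
          · rw [PySem.Set.mem_add] at h
            rcases h with h | h
            · exact Or.inl h
            · exact Or.inr ⟨a, by simp, ha, hc, h⟩
          · rcases h with ⟨L, hL, h1, h2, h3⟩
            exact Or.inr ⟨L, by simp [hL], h1, h2, h3⟩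
        · rintro (h | ⟨L, hL, h1, h2, h3⟩)
          · exact Or.inl (by rw [PySem.Set.mem_add]; exact Or.inl h)
          · rcases List.mem_cons.mp hL with rfl | hL'
            · exact Or.inl (by rw [PySem.Set.mem_add]; exact Or.inr h3)
            · exact Or.inr ⟨L, hL', h1, h2, h3⟩
      · rw [if_neg hc]
        rw [ih]
        rw [Bool.not_eq_true] at hc
        constructor
        · rintro (h | ⟨L, hL, h1, h2, h3⟩)
          · exact Or.inl h
          · exact Or.inr ⟨L, by simp [hL], h1, h2, h3⟩
        · rintro (h | ⟨L, hL, h1, h2, h3⟩)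
          · exact Or.inl h
          · rcases List.mem_cons.mp hL with rfl | hL'
            · rw [← PySem.Set.contains_iff] at h2
              rw [hc] at h2
              exact absurd h2 Bool.false_ne_true
            · exact Or.inr ⟨L, hL', h1, h2, h3⟩
    · rw [if_neg ha]
      rw [ih]
      constructor
      · rintro (h | ⟨L, hL, h1, h2, h3⟩)
        · exact Or.inl h
        · exact Or.inr ⟨L, by simp [hL], h1, h2, h3⟩
      · rintro (h | ⟨L, hL, h1, h2, h3⟩)
        · exact Or.inl h
        · rcases List.mem_cons.mp hL with rfl | hL'
          · omega
          · exact Or.inr ⟨L, hL', h1, h2, h3⟩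

lemma mem_outer_fold {ps : List Nat} {fl : List Char} {lcs : List Nat} {names : PySem.Set (List Char)} {m : PySem.Set (List Char)} {x : List Char} :
    x ∈ ps.foldl
      (fun m p =>
        if pvIsDelim (fl.getD p ' ') then
          lcs.foldl
            (fun m2 L =>
              if L ≤ p then
                let w := PySem.List.slice fl (some ((p - L : Nat) : Int)) (some ((p : Nat) : Int))
                if PySem.Set.contains names w then PySem.Set.add m2 w else m2
              else m2)
            m
        else m) m
    ↔ x ∈ m ∨ ∃ p ∈ ps, pvIsDelim (fl.getD p ' ') = true ∧
        ∃ L ∈ lcs, L ≤ p ∧ pvWord fl p L ∈ names ∧ x = pvWord fl p L := by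
  induction ps generalizing m with
  | nil => simp
  | cons a t ih =>
    simp only [List.foldl_cons]
    by_cases hd : pvIsDelim (fl.getD a ' ') = true
    · rw [if_pos hd, ih, mem_inner_fold]
      constructor
      · rintro ((h | ⟨L, hL, h1, h2, h3⟩) | ⟨p, hp, hdp, rest⟩)
        · exact Or.inl h
        · exact Or.inr ⟨a, by simp, hd, L, hL, h1, h2, h3⟩
        · exact Or.inr ⟨p, by simp [hp], hdp, rest⟩
      · rintro (h | ⟨p, hp, hdp, rest⟩)
        · exact Or.inl (Or.inl h)
        · rcases List.mem_cons.mp hp with rfl | hp'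
          · exact Or.inl (Or.inr rest)
          · exact Or.inr ⟨p, hp', hdp, rest⟩
    · rw [if_neg hd, ih]
      constructor
      · rintro (h | ⟨p, hp, hdp, rest⟩)
        · exact Or.inl h
        · exact Or.inr ⟨p, by simp [hp], hdp, rest⟩
      · rintro (h | ⟨p, hp, hdp, rest⟩)
        · exact Or.inl h
        · rcases List.mem_cons.mp hp with rfl | hp'
          · exact absurd hdp hd
          · exact Or.inr ⟨p, hp', hdp, rest⟩

lemma length_pvWord {fl : List Char} {p L : Nat} (hp : p < fl.length) (hL : L ≤ p) :
    (pvWord fl p L).length = L := by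
  simp only [pvWord, List.length_take, List.length_drop]
  omega

lemma isIn_append_singleton_iff {fl nm : List Char} {d : Char} :
    PySem.Chars.isIn (nm ++ [d]) fl = true ↔
      ∃ p, p < fl.length ∧ fl.getD p ' ' = d ∧ nm.length ≤ p ∧ pvWord fl p nm.length = nm := by
  rw [← PySem.Chars.exists_prefix_drop_iff_isIn]
  constructor
  · rintro ⟨j, hpre⟩
    have hlen : nm.length + 1 ≤ fl.length - j := by
      have := hpre.length_le
      simpa using this
    have htake := List.prefix_iff_eq_take.mp hpre
    simp only [List.length_append, List.length_singleton] at htake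
    refine ⟨j + nm.length, by omega, ?_, by omega, ?_⟩
    · have hget : (fl.drop j)[nm.length]? = some d := by
        rw [← List.getElem?_take_of_lt (j := nm.length + 1) (by omega), ← htake]
        simp
      have : fl[j + nm.length]? = some d := by
        rw [← List.getElem?_drop]; exact hget
      rw [List.getD_eq_getElem?_getD, this]
      rfl
    · have hword : pvWord fl (j + nm.length) nm.length = (fl.drop j).take nm.length := by
        simp only [pvWord, Nat.add_sub_cancel]
      rw [hword]
      have h2 : (fl.drop j).take nm.length = ((fl.drop j).take (nm.length + 1)).take nm.length := by
        rw [List.take_take]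
        congr 1
        omega
      rw [h2, ← htake]
      exact List.take_left ..
  · rintro ⟨p, hp, hdp, hL, hw⟩
    refine ⟨p - nm.length, ?_⟩
    rw [List.prefix_iff_eq_take]
    have hget : (fl.drop (p - nm.length))[nm.length]? = some d := by
      rw [List.getElem?_drop]
      have : p - nm.length + nm.length = p := by omega
      rw [this, List.getElem?_eq_getElem hp]
      rw [List.getD_eq_getElem?_getD, List.getElem?_eq_getElem hp] at hdp
      simp at hdp
      simp [hdp]
    have : (fl.drop (p - nm.length)).take (nm.length + 1)
        = (fl.drop (p - nm.length)).take nm.length ++ ((fl.drop (p - nm.length))[nm.length]?).toList := by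
      exact List.take_add_one
    rw [hget] at this
    simp only [List.length_append, List.length_singleton]
    rw [this]
    rw [show (fl.drop (p - nm.length)).take nm.length = pvWord fl p nm.length from rfl, hw]
    simp

lemma pvCondA_iff_mid {fl nm : List Char} : pvCondA fl nm = true ↔ pvMid fl nm := by
  simp only [pvCondA, Bool.or_eq_true]
  rw [isIn_append_singleton_iff, isIn_append_singleton_iff, isIn_append_singleton_iff]
  constructor
  · rintro ((⟨p, h1, h2, h3, h4⟩ | ⟨p, h1, h2, h3, h4⟩) | ⟨p, h1, h2, h3, h4⟩) <;>
      exact ⟨p, h1, by simp only [pvIsDelim, Bool.or_eq_true, beq_iff_eq]; tauto, h3, h4⟩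
  · rintro ⟨p, h1, h2, h3, h4⟩
    have : fl.getD p ' ' = ' ' ∨ fl.getD p ' ' = '(' ∨ fl.getD p ' ' = ')' := by
      simp only [pvIsDelim, Bool.or_eq_true, beq_iff_eq] at h2
      tauto
    rcases this with h | h | h
    · exact Or.inl (Or.inl ⟨p, h1, h, h3, h4⟩)
    · exact Or.inr ⟨p, h1, h, h3, h4⟩
    · exact Or.inl (Or.inr ⟨p, h1, h, h3, h4⟩)

-- B's matched set contains exactly the names satisfying A's condition
lemma contains_matched_eq {fl : List Char} {names0 : List (List Char)} {nm : List Char} (hnm : nm ∈ names0) :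
    PySem.Set.contains
      ((List.range fl.length).foldl
        (fun m p =>
          if pvIsDelim (fl.getD p ' ') then
            (PySem.Set.ofList (names0.map (fun x => x.length))).foldl
              (fun m2 L =>
                if L ≤ p then
                  let w := PySem.List.slice fl (some ((p - L : Nat) : Int)) (some ((p : Nat) : Int))
                  if PySem.Set.contains (PySem.Set.ofList names0) w then PySem.Set.add m2 w else m2
                else m2)
              m
          else m) PySem.Set.empty) nm
    = pvCondA fl nm := by
  rcases hb : pvCondA fl nm with _ | _
  · rw [← Bool.not_eq_true, PySem.Set.contains_iff, mem_outer_fold]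
    rintro (h | ⟨p, hp, hdp, L, hL, h1, h2, h3⟩)
    · simp [PySem.Set.empty] at h
    · rw [List.mem_range] at hp
      have hxlen : nm.length = L := by rw [h3]; exact length_pvWord hp h1
      have : pvCondA fl nm = true := by
        rw [pvCondA_iff_mid]
        exact ⟨p, hp, hdp, by omega, by rw [← hxlen] at h3; exact h3.symm⟩
      simp [this] at hb
  · rw [PySem.Set.contains_iff, mem_outer_fold]
    rw [pvCondA_iff_mid] at hb
    rcases hb with ⟨p, hp, hdp, h3, h4⟩
    refine Or.inr ⟨p, List.mem_range.mpr hp, hdp, nm.length, ?_, h3, ?_, h4.symm⟩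
    · rw [PySem.Set.mem_ofList]
      exact List.mem_map.mpr ⟨nm, hnm, rfl⟩
    · rw [h4, PySem.Set.mem_ofList]
      exact hnm

lemma fold_pair_eq (c1 c2 : String × String → Bool) (l : List (String × String))
    (hc : ∀ kv ∈ l, c1 kv = c2 kv) :
    ∀ (d e : PySem.Dict String String),
      (l.foldl
        (fun (st : PySem.Dict String String × PySem.Dict String String) kv =>
          if c1 kv then (st.1.insert kv.1 kv.2, st.2) else (st.1, st.2.insert kv.1 kv.2))
        (d, e)).1
      = l.foldl (fun (d : PySem.Dict String String) kv => if c2 kv then d.insert kv.1 kv.2 else d) d := by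
  induction l with
  | nil => intro d e; rfl
  | cons a t ih =>
    intro d e
    simp only [List.foldl_cons]
    rw [hc a (by simp)]
    by_cases h : c2 a = true
    · rw [if_pos h, if_pos h]
      exact ih (fun kv hkv => hc kv (by simp [hkv])) _ _
    · rw [if_neg h, if_neg h]
      exact ih (fun kv hkv => hc kv (by simp [hkv])) _ _

-- ===== VERDICT (by name: the statement is the Claim_ definition above) =====
theorem unverified_valid_lemmas_for_formal_spec : Claim_equal_unverified_valid_lemmas_for_formal := by
  intro formal unverified_lemmas _
  unfold Spec_unverified_valid_lemmas_for_formal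
  unfold unverified_valid_lemmas_for_formal unverified_valid_lemmas_for_formal_alt
  congr 1
  refine fold_pair_eq
    (fun kv => pvCondA formal.toList kv.1.toList)
    (fun kv => PySem.Set.contains _ kv.1.toList)
    unverified_lemmas ?_ PySem.Dict.empty PySem.Dict.empty
  intro kv hkv
  have h := contains_matched_eq (fl := formal.toList)
    (names0 := unverified_lemmas.map (fun kv => kv.1.toList))
    (List.mem_map.mpr ⟨kv, hkv, rfl⟩)
  simp only [List.map_map, Function.comp_def] at h
  exact h.symm
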